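-- pv_equiv track=rewrite | github.com/JayBhatt2021/python-data-structures-practice | src/heaps/alternate_smallest_integers.py | alternate_smallest_integers
-- ===== SOURCE A (Python) =====
-- import heapq
-- from typing import List
--
-- def alternate_smallest_integers(integers: List[int]) -> List[int]:
--     """Alternately arrange the smallest integers from the input list.
--
--     :param integers: A list of integers.
--     :return: A list of integers with the smallest integers arranged alternately.
--     """
--     heapq.heapify(integers)
--     smallest_integers = []
--
--     while integers:
--         # Pop the smallest and second-smallest integers from the heap
--         smallest = heapq.heappop(integers)
--         second_smallest = heapq.heappop(integers)
--
--         # Append the second_smallest and smallest to smallest_integers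
--         smallest_integers.append(second_smallest)
--         smallest_integers.append(smallest)
--
--     return smallest_integers
-- ===== SOURCE B (Python) =====
-- def alternate_smallest_integers(integers):
--     """Alternately arrange the smallest integers from the input list.
--
--     Sort a copy descending once, then consume it from the end (the smallest
--     remaining element) two at a time, emitting each pair swapped.  Like A,
--     raises IndexError on odd-length input (the second pop on the exhausted
--     list); unlike A, the argument itself is left unmodified.
--     """
--     s = sorted(integers, reverse=True)
--     out = []
--     while s:
--         a = s.pop()   # smallest remaining
--         b = s.pop()   # IndexError on odd-length input, like A
--         out.append(b)
--         out.append(a)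
--     return out
-- ===== Notes on version B (the rewrite author's own statement) =====
-- stated objective: faster
-- what changed: Replaces the binary heap with repeated extract-min by a single up-front sort of a copy followed by one linear end-popping pass that emits consecutive pairs swapped; B does not mutate the argument. Intended as faster; measured about 1.9x at n=262144 in a timing run.
import Mathlib
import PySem

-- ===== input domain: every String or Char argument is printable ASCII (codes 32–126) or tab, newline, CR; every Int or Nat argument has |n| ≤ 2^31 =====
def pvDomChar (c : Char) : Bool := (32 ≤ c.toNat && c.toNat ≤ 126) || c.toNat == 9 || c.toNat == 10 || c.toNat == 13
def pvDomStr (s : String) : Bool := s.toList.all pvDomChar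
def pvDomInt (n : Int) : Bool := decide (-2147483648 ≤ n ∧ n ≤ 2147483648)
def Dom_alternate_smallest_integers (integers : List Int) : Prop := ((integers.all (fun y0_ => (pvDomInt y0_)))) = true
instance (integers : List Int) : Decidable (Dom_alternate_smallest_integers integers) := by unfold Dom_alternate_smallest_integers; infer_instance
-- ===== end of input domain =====

-- B replaces A's heapify + repeated heappop by one up-front sort of a copy plus a single
-- end-popping pair pass; return-value equivalence only: A empties its argument in place, B does not.


-- ===== PORT A =====
-- heappop on a heap of Ints returns the minimum value and leaves the rest;
-- ported as min?-and-erase (values are compared by value, so which equal copy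
-- is removed is unobservable).
def pvHeappop? (h : List Int) : Option (Int × List Int) :=
  match PySem.List.min? h (fun x => x) with
  | none => none
  | some m => some (m, h.erase m)

theorem pvHeappop?_length {h : List Int} {m : Int} {h1 : List Int}
    (e : pvHeappop? h = some (m, h1)) : h1.length + 1 = h.length := by
  unfold pvHeappop? at e
  cases hm : PySem.List.min? h (fun x => x) with
  | none => simp [hm] at e
  | some v =>
    simp [hm] at e
    obtain ⟨rfl, rfl⟩ := e
    have hv := PySem.List.min?_mem hm
    have h1 := List.length_erase_of_mem hv
    have h2 := List.length_pos_of_mem hv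
    omega

-- while integers: smallest = heappop; second_smallest = heappop; append both.
-- The second heappop on an empty heap is Python's IndexError: excluded by Pre_,
-- the port stops there.
def pvALoop (h : List Int) : List Int :=
  match e1 : pvHeappop? h with
  | none => []
  | some (m, h1) =>
    match e2 : pvHeappop? h1 with
    | none => []
    | some (m2, h2) => m2 :: m :: pvALoop h2
termination_by h.length
decreasing_by
  have := pvHeappop?_length e1
  have := pvHeappop?_length e2
  omega

def alternate_smallest_integers (integers : List Int) : List Int :=
  pvALoop integers

-- ===== PORT B =====
-- s = sorted(integers, reverse=True); while s: a = s.pop(); b = s.pop(); out += [b, a]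
-- s.pop() pops the LAST element: ported with PySem.List.pop? (default index -1).
-- The second pop on the exhausted list is Python's IndexError: excluded by Pre_,
-- the port stops there.
def pvBLoop (s : List Int) : List Int :=
  match e1 : PySem.List.pop? s with
  | none => []
  | some (a, s1) =>
    match e2 : PySem.List.pop? s1 with
    | none => []
    | some (b, s2) => b :: a :: pvBLoop s2
termination_by s.length
decreasing_by
  have := PySem.List.length_of_pop?_eq_some _ e1
  have := PySem.List.length_of_pop?_eq_some _ e2
  simp at *
  omega

def alternate_smallest_integers_alt (integers : List Int) : List Int :=
  pvBLoop (PySem.List.sorted integers (fun x => x) true)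

-- ===== PRECONDITION & SPEC =====
-- A raises IndexError on odd-length input (second heappop on the empty heap);
-- B raises IndexError there too (second pop on the exhausted sorted copy).
def Pre_alternate_smallest_integers (integers : List Int) : Prop :=
  integers.length % 2 = 0
instance (integers : List Int) : Decidable (Pre_alternate_smallest_integers integers) := by
  unfold Pre_alternate_smallest_integers; infer_instance

def pvWitness_alternate_smallest_integers : List Int := [3, 1, 2, 4]

def Spec_alternate_smallest_integers (integers : List Int) (out : List Int) : Prop :=
  out = alternate_smallest_integers_alt integers
instance (integers : List Int) (out : List Int) : Decidable (Spec_alternate_smallest_integers integers out) := by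
  unfold Spec_alternate_smallest_integers; infer_instance

-- ===== CLAIM (what is proved, stated in full; the proofs are below) =====
def Claim_equal_alternate_smallest_integers : Prop :=
  ∀ (integers : List Int), Dom_alternate_smallest_integers integers →
    Pre_alternate_smallest_integers integers →
    Spec_alternate_smallest_integers integers (alternate_smallest_integers integers)

-- ===== LEMMAS AND PROOFS =====

theorem pvALoop_eq (h : List Int) :
    pvALoop h =
      match pvHeappop? h with
      | none => []
      | some (m, h1) =>
        match pvHeappop? h1 with
        | none => []
        | some (m2, h2) => m2 :: m :: pvALoop h2 := by
  rw [pvALoop]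
  split
  · simp [*]
  · split <;> simp [*]

theorem pvBLoop_eq (s : List Int) :
    pvBLoop s =
      match PySem.List.pop? s with
      | none => []
      | some (a, s1) =>
        match PySem.List.pop? s1 with
        | none => []
        | some (b, s2) => b :: a :: pvBLoop s2 := by
  rw [pvBLoop]
  split
  · simp [*]
  · split <;> simp [*]

-- a descending-pairwise rearrangement of xs IS sorted(xs, reverse=True) (Int values: ties are identical)
theorem pv_sorted_rev_id_eq_of_perm_of_pairwise (xs ys : List Int) (hp : ys.Perm xs)
    (h : List.Pairwise (fun a b => b ≤ a) ys) :
    PySem.List.sorted xs (fun x => x) true = ys := by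
  have h1 : (PySem.List.sorted xs (fun x => x) true).Perm ys :=
    (PySem.List.sorted_perm _ _ _).trans hp.symm
  exact h1.eq_of_pairwise (fun a b _ _ hab hba => le_antisymm hba hab)
    (PySem.List.sorted_pairwise_rev _ _) h

-- sorted desc l ends with [m2, m] where m, m2 are the two successive minima.
theorem pv_sorted_rev_two_min (l : List Int) (m m2 : Int)
    (h1 : PySem.List.min? l (fun x => x) = some m)
    (h2 : PySem.List.min? (l.erase m) (fun x => x) = some m2) :
    PySem.List.sorted l (fun x => x) true =
      PySem.List.sorted ((l.erase m).erase m2) (fun x => x) true ++ [m2, m] := by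
  have hm : m ∈ l := PySem.List.min?_mem h1
  have hm2 : m2 ∈ l.erase m := PySem.List.min?_mem h2
  have hminL := PySem.List.min?_isMin h1
  have hminL1 := PySem.List.min?_isMin h2
  have hmm2 : m ≤ m2 := hminL _ (List.mem_of_mem_erase hm2)
  apply pv_sorted_rev_id_eq_of_perm_of_pairwise
  · refine (((PySem.List.sorted_perm _ _ _).append_right [m2, m]).trans
      List.perm_append_comm).trans ?_
    show (m2 :: m :: (l.erase m).erase m2).Perm l
    refine (List.Perm.swap m m2 _).trans ?_
    exact (((List.perm_cons_erase hm2).symm).cons m).trans (List.perm_cons_erase hm).symm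
  · rw [List.pairwise_append]
    refine ⟨PySem.List.sorted_pairwise_rev _ _, ?_, ?_⟩
    · simp [hmm2]
    · intro x hx y hy
      have hxl : x ∈ l := List.mem_of_mem_erase
        (List.mem_of_mem_erase ((PySem.List.mem_sorted _ _ _ _).1 hx))
      have hxl1 : x ∈ l.erase m :=
        List.mem_of_mem_erase ((PySem.List.mem_sorted _ _ _ _).1 hx)
      rcases List.mem_cons.1 hy with rfl | hy
      · exact hminL1 _ hxl1
      · simp only [List.mem_singleton] at hy
        subst hy
        exact hminL _ hxl

theorem pvALoop_eq_pvBLoop_sorted :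
    ∀ n (l : List Int), l.length ≤ n → l.length % 2 = 0 →
      pvALoop l = pvBLoop (PySem.List.sorted l (fun x => x) true) := by
  intro n
  induction n with
  | zero =>
    intro l hn _
    have : l = [] := List.eq_nil_of_length_eq_zero (Nat.le_zero.1 hn)
    subst this
    rw [pvALoop_eq, pvBLoop_eq]
    simp [pvHeappop?, PySem.List.min?, PySem.List.sorted, PySem.List.pop?, PySem.List.pyIdx?]
  | succ n ih =>
    intro l hn hev
    cases hl : l with
    | nil =>
      subst hl
      rw [pvALoop_eq, pvBLoop_eq]
      simp [pvHeappop?, PySem.List.min?, PySem.List.sorted, PySem.List.pop?, PySem.List.pyIdx?]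
    | cons x t =>
      subst hl
      have hxl : (x :: t).length = t.length + 1 := by simp
      obtain ⟨m, h1⟩ : ∃ m, PySem.List.min? (x :: t) (fun y => y) = some m := by
        cases e : PySem.List.min? (x :: t) (fun y => y) with
        | none => exact absurd ((PySem.List.min?_eq_none_iff _ _).1 e) (by simp)
        | some m => exact ⟨m, rfl⟩
      have hm : m ∈ x :: t := PySem.List.min?_mem h1
      have hlen1 : ((x :: t).erase m).length = (x :: t).length - 1 :=
        List.length_erase_of_mem hm
      have hne1 : (x :: t).erase m ≠ [] := by
        apply List.ne_nil_of_length_pos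
        omega
      obtain ⟨m2, h2⟩ : ∃ m2, PySem.List.min? ((x :: t).erase m) (fun y => y) = some m2 := by
        cases e : PySem.List.min? ((x :: t).erase m) (fun y => y) with
        | none => exact absurd ((PySem.List.min?_eq_none_iff _ _).1 e) hne1
        | some m2 => exact ⟨m2, rfl⟩
      have hm2 : m2 ∈ (x :: t).erase m := PySem.List.min?_mem h2
      have hlen2 : (((x :: t).erase m).erase m2).length = ((x :: t).erase m).length - 1 :=
        List.length_erase_of_mem hm2
      have hrec := ih (((x :: t).erase m).erase m2) (by omega) (by omega)
      rw [pv_sorted_rev_two_min _ _ _ h1 h2]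
      set s2 := PySem.List.sorted (((x :: t).erase m).erase m2) (fun y => y) true with hs2
      have ha : PySem.List.pop? (s2 ++ [m2, m]) = some (m, s2 ++ [m2]) := by
        have := PySem.List.pop?_last (s2 ++ [m2]) m
        simpa using this
      have hb := PySem.List.pop?_last s2 m2
      rw [pvALoop_eq, pvBLoop_eq]
      simp only [pvHeappop?, h1, h2, ha, hb]
      rw [← hrec]

-- ===== VERDICT (by name: the statement is the Claim_ definition above) =====
theorem alternate_smallest_integers_spec : Claim_equal_alternate_smallest_integers := by
  intro l _ hpre
  unfold Spec_alternate_smallest_integers alternate_smallest_integers alternate_smallest_integers_alt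
  exact pvALoop_eq_pvBLoop_sorted l.length l (le_refl _) hpre
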